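-- pv_equiv track=rewrite | github.com/aliduabubakari/notebook_provenance | notebook_provenance/graph/transformation.py | _classify_transformation
-- ===== SOURCE A (Python) =====
-- from typing import Dict, List, Optional, Set
--
-- def _classify_transformation(function_calls: List[str]) -> str:
--     """
--     Classify transformation type.
--
--     Args:
--         function_calls: List of function calls
--
--     Returns:
--         Semantic type string
--     """
--     if not function_calls:
--         return "generic"
--
--     func = function_calls[0].lower()
--
--     # Classification map
--     if any(kw in func for kw in ['read', 'load', 'fetch']):
--         return "data_loading"
--     elif any(kw in func for kw in ['merge', 'join', 'concat']):
--         return "data_combination"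
--     elif any(kw in func for kw in ['filter', 'select', 'drop', 'where']):
--         return "data_selection"
--     elif any(kw in func for kw in ['groupby', 'aggregate', 'agg', 'sum', 'mean']):
--         return "aggregation"
--     elif any(kw in func for kw in ['pivot', 'melt', 'reshape']):
--         return "reshaping"
--     elif any(kw in func for kw in ['reconcile', 'match', 'dedupe']):
--         return "reconciliation"
--     elif any(kw in func for kw in ['extend', 'enrich', 'augment']):
--         return "enrichment"
--     elif any(kw in func for kw in ['fit', 'train']):
--         return "model_training"
--     elif any(kw in func for kw in ['predict', 'score']):
--         return "prediction"
--     elif any(kw in func for kw in ['save', 'write', 'export', 'to_']):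
--         return "data_export"
--     else:
--         return "transformation"
-- ===== SOURCE B (Python) =====
-- from typing import List
--
-- # Flattened (keyword, rule-index) table; lower index = higher priority.
-- _KEYWORDS = [
--     ("read", 0), ("load", 0), ("fetch", 0),
--     ("merge", 1), ("join", 1), ("concat", 1),
--     ("filter", 2), ("select", 2), ("drop", 2), ("where", 2),
--     ("groupby", 3), ("aggregate", 3), ("agg", 3), ("sum", 3), ("mean", 3),
--     ("pivot", 4), ("melt", 4), ("reshape", 4),
--     ("reconcile", 5), ("match", 5), ("dedupe", 5),
--     ("extend", 6), ("enrich", 6), ("augment", 6),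
--     ("fit", 7), ("train", 7),
--     ("predict", 8), ("score", 8),
--     ("save", 9), ("write", 9), ("export", 9), ("to_", 9),
-- ]
--
-- _LABELS = [
--     "data_loading", "data_combination", "data_selection", "aggregation",
--     "reshaping", "reconciliation", "enrichment", "model_training",
--     "prediction", "data_export", "transformation",
-- ]
--
-- def _candidate_indices(func: str) -> List[int]:
--     # One left-to-right scan of the string: at each position record the rule
--     # index of every keyword that starts there.
--     return [idx for i in range(len(func) + 1)
--                 for kw, idx in _KEYWORDS
--                 if func.startswith(kw, i)]
--
-- def _classify_transformation(function_calls: List[str]) -> str: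
--     if not function_calls:
--         return "generic"
--     func = function_calls[0].lower()
--     best = min(_candidate_indices(func), default=10)
--     return _LABELS[best]
-- ===== Notes on version B (the rewrite author's own statement) =====
-- stated objective: alternative
-- what changed: Instead of running ten ordered any-substring tests like A, B scans the lowercased string position by position, collects the rule index of every flattened keyword that starts at each position, and returns the label of the minimum index collected (default 10 = 'transformation'); priority comes from min, not from branch order.
import Mathlib
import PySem

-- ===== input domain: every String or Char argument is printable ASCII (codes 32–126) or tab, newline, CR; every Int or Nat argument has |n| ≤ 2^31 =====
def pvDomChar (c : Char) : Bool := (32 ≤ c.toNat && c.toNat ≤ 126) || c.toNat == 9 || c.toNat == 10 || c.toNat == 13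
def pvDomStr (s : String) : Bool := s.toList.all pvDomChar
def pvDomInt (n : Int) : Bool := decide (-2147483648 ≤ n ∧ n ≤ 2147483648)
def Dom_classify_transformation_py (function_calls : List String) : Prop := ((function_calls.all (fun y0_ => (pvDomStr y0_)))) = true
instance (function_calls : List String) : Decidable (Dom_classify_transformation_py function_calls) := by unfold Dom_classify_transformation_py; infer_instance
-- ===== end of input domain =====

-- ===== PORT A =====
-- B classifies by a position-scan over the string collecting matching rule indices and taking their minimum,
-- instead of A's ordered chain of any-substring tests (alternative decomposition, same cost).
def classify_transformation_py (function_calls : List String) : String :=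
  match function_calls with
  | [] => "generic"
  | f :: _ =>
    let func := PySem.Str.lower f
    if ["read", "load", "fetch"].any (fun kw => PySem.Str.isIn kw func) then "data_loading"
    else if ["merge", "join", "concat"].any (fun kw => PySem.Str.isIn kw func) then "data_combination"
    else if ["filter", "select", "drop", "where"].any (fun kw => PySem.Str.isIn kw func) then "data_selection"
    else if ["groupby", "aggregate", "agg", "sum", "mean"].any (fun kw => PySem.Str.isIn kw func) then "aggregation"
    else if ["pivot", "melt", "reshape"].any (fun kw => PySem.Str.isIn kw func) then "reshaping"
    else if ["reconcile", "match", "dedupe"].any (fun kw => PySem.Str.isIn kw func) then "reconciliation"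
    else if ["extend", "enrich", "augment"].any (fun kw => PySem.Str.isIn kw func) then "enrichment"
    else if ["fit", "train"].any (fun kw => PySem.Str.isIn kw func) then "model_training"
    else if ["predict", "score"].any (fun kw => PySem.Str.isIn kw func) then "prediction"
    else if ["save", "write", "export", "to_"].any (fun kw => PySem.Str.isIn kw func) then "data_export"
    else "transformation"

-- ===== PORT B =====
-- _KEYWORDS: flattened (keyword, rule-index) table
def ctKeywords : List (String × Nat) :=
  [ ("read", 0), ("load", 0), ("fetch", 0),
    ("merge", 1), ("join", 1), ("concat", 1),
    ("filter", 2), ("select", 2), ("drop", 2), ("where", 2),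
    ("groupby", 3), ("aggregate", 3), ("agg", 3), ("sum", 3), ("mean", 3),
    ("pivot", 4), ("melt", 4), ("reshape", 4),
    ("reconcile", 5), ("match", 5), ("dedupe", 5),
    ("extend", 6), ("enrich", 6), ("augment", 6),
    ("fit", 7), ("train", 7),
    ("predict", 8), ("score", 8),
    ("save", 9), ("write", 9), ("export", 9), ("to_", 9) ]

-- _LABELS
def ctLabels : List String :=
  [ "data_loading", "data_combination", "data_selection", "aggregation",
    "reshaping", "reconciliation", "enrichment", "model_training",
    "prediction", "data_export", "transformation" ]

-- _candidate_indices: the comprehension is ported as flatMap/filter/map; range(len(func)+1)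
-- over the (nonnegative) length is List.range; func.startswith(kw, i) with i ≥ 0 is exactly
-- startswith on the i-dropped character list.
def ctCandidates (func : String) : List Nat :=
  (List.range (func.toList.length + 1)).flatMap (fun i =>
    (ctKeywords.filter (fun p => PySem.Chars.startswith (func.toList.drop i) p.1.toList)).map
      (fun p => p.2))

def classify_transformation_py_alt (function_calls : List String) : String :=
  match function_calls with
  | [] => "generic"
  | f :: _ =>
    let func := PySem.Str.lower f
    let best := PySem.List.minD (ctCandidates func) (fun x => x) 10
    -- _LABELS[best]: best ≤ 10 always, so the list index never raises
    ctLabels.getD best ""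
-- ===== PRECONDITION & SPEC =====
def Spec_classify_transformation_py (function_calls : List String) (out : String) : Prop := out = classify_transformation_py_alt function_calls
instance (function_calls : List String) (out : String) : Decidable (Spec_classify_transformation_py function_calls out) := by unfold Spec_classify_transformation_py; infer_instance

-- ===== CLAIM (what is proved, stated in full; the proofs are below) =====
def Claim_equal_classify_transformation_py : Prop := ∀ (function_calls : List String), Dom_classify_transformation_py function_calls → Spec_classify_transformation_py function_calls (classify_transformation_py function_calls)


-- ===== LEMMAS AND PROOFS =====

-- condA func k: the k-th branch condition of A, expressed through the keyword table
def ctRuleKws (k : Nat) : List String := (ctKeywords.filter (fun p => p.2 = k)).map (fun p => p.1)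

def condA (func : String) (k : Nat) : Bool := (ctRuleKws k).any (fun kw => PySem.Str.isIn kw func)

-- A's nested chain, as the index of the first matching rule
def chainIdx (func : String) : Nat :=
  if condA func 0 then 0 else if condA func 1 then 1 else if condA func 2 then 2
  else if condA func 3 then 3 else if condA func 4 then 4 else if condA func 5 then 5
  else if condA func 6 then 6 else if condA func 7 then 7 else if condA func 8 then 8
  else if condA func 9 then 9 else 10

lemma ctKeywords_ne_nil : ∀ p ∈ ctKeywords, p.1.toList ≠ [] := by decide

lemma ctKeywords_le_nine : ∀ p ∈ ctKeywords, p.2 ≤ 9 := by decide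

lemma mem_ctCandidates (func : String) (k : Nat) :
    k ∈ ctCandidates func ↔ condA func k = true := by
  unfold ctCandidates condA ctRuleKws
  simp only [List.mem_flatMap, List.mem_map, List.mem_filter, List.mem_range,
    List.any_eq_true, PySem.Chars.startswith_iff, decide_eq_true_eq]
  constructor
  · rintro ⟨i, _, p, ⟨hp, hpre⟩, hk⟩
    exact ⟨p.1, ⟨p, ⟨hp, hk⟩, rfl⟩,
      (PySem.Chars.exists_prefix_drop_iff_isIn _ _).1 ⟨i, hpre⟩⟩
  · rintro ⟨kw, ⟨p, ⟨hp, hk⟩, rfl⟩, hin⟩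
    obtain ⟨j, hj⟩ := (PySem.Chars.exists_prefix_drop_iff_isIn _ _).2 hin
    have hjle : j ≤ func.toList.length := by
      by_contra h
      have : func.toList.drop j = [] := List.drop_eq_nil_of_le (by omega)
      rw [this] at hj
      exact ctKeywords_ne_nil p hp (List.prefix_nil.mp hj)
    exact ⟨j, by omega, p, ⟨hp, hj⟩, hk⟩

lemma classify_A_eq (f : String) (rest : List String) :
    classify_transformation_py (f :: rest) =
      ctLabels.getD (chainIdx (PySem.Str.lower f)) "" := by
  simp only [classify_transformation_py]
  unfold chainIdx
  rw [show (["read", "load", "fetch"].any (fun kw => PySem.Str.isIn kw (PySem.Str.lower f))) = condA (PySem.Str.lower f) 0 from rfl,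
      show (["merge", "join", "concat"].any (fun kw => PySem.Str.isIn kw (PySem.Str.lower f))) = condA (PySem.Str.lower f) 1 from rfl,
      show (["filter", "select", "drop", "where"].any (fun kw => PySem.Str.isIn kw (PySem.Str.lower f))) = condA (PySem.Str.lower f) 2 from rfl,
      show (["groupby", "aggregate", "agg", "sum", "mean"].any (fun kw => PySem.Str.isIn kw (PySem.Str.lower f))) = condA (PySem.Str.lower f) 3 from rfl,
      show (["pivot", "melt", "reshape"].any (fun kw => PySem.Str.isIn kw (PySem.Str.lower f))) = condA (PySem.Str.lower f) 4 from rfl,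
      show (["reconcile", "match", "dedupe"].any (fun kw => PySem.Str.isIn kw (PySem.Str.lower f))) = condA (PySem.Str.lower f) 5 from rfl,
      show (["extend", "enrich", "augment"].any (fun kw => PySem.Str.isIn kw (PySem.Str.lower f))) = condA (PySem.Str.lower f) 6 from rfl,
      show (["fit", "train"].any (fun kw => PySem.Str.isIn kw (PySem.Str.lower f))) = condA (PySem.Str.lower f) 7 from rfl,
      show (["predict", "score"].any (fun kw => PySem.Str.isIn kw (PySem.Str.lower f))) = condA (PySem.Str.lower f) 8 from rfl,
      show (["save", "write", "export", "to_"].any (fun kw => PySem.Str.isIn kw (PySem.Str.lower f))) = condA (PySem.Str.lower f) 9 from rfl]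
  by_cases h0 : condA (PySem.Str.lower f) 0 = true
  · simp [ctLabels, h0]
  by_cases h1 : condA (PySem.Str.lower f) 1 = true
  · simp [ctLabels, h0, h1]
  by_cases h2 : condA (PySem.Str.lower f) 2 = true
  · simp [ctLabels, h0, h1, h2]
  by_cases h3 : condA (PySem.Str.lower f) 3 = true
  · simp [ctLabels, h0, h1, h2, h3]
  by_cases h4 : condA (PySem.Str.lower f) 4 = true
  · simp [ctLabels, h0, h1, h2, h3, h4]
  by_cases h5 : condA (PySem.Str.lower f) 5 = true
  · simp [ctLabels, h0, h1, h2, h3, h4, h5]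
  by_cases h6 : condA (PySem.Str.lower f) 6 = true
  · simp [ctLabels, h0, h1, h2, h3, h4, h5, h6]
  by_cases h7 : condA (PySem.Str.lower f) 7 = true
  · simp [ctLabels, h0, h1, h2, h3, h4, h5, h6, h7]
  by_cases h8 : condA (PySem.Str.lower f) 8 = true
  · simp [ctLabels, h0, h1, h2, h3, h4, h5, h6, h7, h8]
  by_cases h9 : condA (PySem.Str.lower f) 9 = true
  · simp [ctLabels, h0, h1, h2, h3, h4, h5, h6, h7, h8, h9]
  simp [ctLabels, h0, h1, h2, h3, h4, h5, h6, h7, h8, h9]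

lemma chainIdx_eq_of_least (func : String) (m : Nat) (hm : condA func m = true)
    (hleast : ∀ j, condA func j = true → m ≤ j) (h9 : m ≤ 9) :
    chainIdx func = m := by
  unfold chainIdx
  split_ifs with h0 h1 h2 h3 h4 h5 h6 h7 h8 h9'
  · have := hleast 0 h0; omega
  · have := hleast 1 h1; interval_cases m <;> simp_all
  · have := hleast 2 h2; interval_cases m <;> simp_all
  · have := hleast 3 h3; interval_cases m <;> simp_all
  · have := hleast 4 h4; interval_cases m <;> simp_all
  · have := hleast 5 h5; interval_cases m <;> simp_all
  · have := hleast 6 h6; interval_cases m <;> simp_all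
  · have := hleast 7 h7; interval_cases m <;> simp_all
  · have := hleast 8 h8; interval_cases m <;> simp_all
  · have := hleast 9 h9'; interval_cases m <;> simp_all
  · interval_cases m <;> simp_all

-- ===== VERDICT (by name: the statement is the Claim_ definition above) =====
theorem classify_transformation_py_spec : Claim_equal_classify_transformation_py := by
  intro function_calls _
  unfold Spec_classify_transformation_py
  cases function_calls with
  | nil => rfl
  | cons f rest =>
    rw [classify_A_eq]
    show ctLabels.getD (chainIdx (PySem.Str.lower f)) "" =
      ctLabels.getD (PySem.List.minD (ctCandidates (PySem.Str.lower f)) (fun x => x) 10) ""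
    congr 1
    set func := PySem.Str.lower f
    rcases hmin : PySem.List.min? (ctCandidates func) (fun x => x) with _ | m
    · have hnil := (PySem.List.min?_eq_none_iff _ _).1 hmin
      have hfalse : ∀ k, condA func k = false := by
        intro k
        by_contra h
        have : k ∈ ctCandidates func := (mem_ctCandidates func k).2 (by simpa using h)
        simp [hnil] at this
      have : PySem.List.minD (ctCandidates func) (fun x => x) 10 = 10 := by
        simp [hnil, PySem.List.minD, (PySem.List.min?_eq_none_iff ([] : List Nat) (fun x => x)).2 rfl]
      rw [this]
      simp [chainIdx, hfalse]
    · have hmem := PySem.List.min?_mem hmin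
      have hle := PySem.List.min?_isMin hmin
      have hcond := (mem_ctCandidates func m).1 hmem
      have h9 : m ≤ 9 := by
        have := hmem
        unfold ctCandidates at this
        simp only [List.mem_flatMap, List.mem_map, List.mem_filter] at this
        obtain ⟨i, _, p, ⟨hp, _⟩, hk⟩ := this
        exact hk ▸ ctKeywords_le_nine p hp
      have hminD : PySem.List.minD (ctCandidates func) (fun x => x) 10 = m := by
        simp [PySem.List.minD, hmin]
      rw [hminD]
      exact chainIdx_eq_of_least func m hcond
        (fun j hj => hle j ((mem_ctCandidates func j).2 hj)) h9
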